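-- pv_equiv track=rewrite | github.com/FSFbot/100-algoritimos--python | prison_break.py | prisioneiros_liberados
-- ===== SOURCE A (Python) =====
-- def prisioneiros_liberados(celulas):
--     if celulas[0] == 0:
--         return 0
--
--     prisioneiros_liberados = 1
--     for i in range(1, len(celulas)):
--         if celulas[i] == 0:
--             break
--         prisioneiros_liberados += 1
--         celulas = [1 - celula for celula in celulas]
--
--     return prisioneiros_liberados
-- ===== SOURCE B (Python) =====
-- def prisioneiros_liberados(celulas):
--     # Single pass: after step i the whole list has been flipped i times, so the
--     # cell checked at index i (i >= 1) was flipped i-1 times; index 0 is checked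
--     # unflipped.  Target value that stops the loop: 1 for even i >= 2, else 0.
--     for i, c in enumerate(celulas):
--         alvo = 1 if (i > 0 and i % 2 == 0) else 0
--         if c == alvo:
--             return i
--     return len(celulas)
-- ===== Notes on version B (the rewrite author's own statement) =====
-- stated objective: faster
-- what changed: B replaces A's repeated whole-list flipping (rebuilding the list every iteration) by a single enumerate pass that compares each cell against the parity-derived target value, returning the index of the first stop.
import Mathlib
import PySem

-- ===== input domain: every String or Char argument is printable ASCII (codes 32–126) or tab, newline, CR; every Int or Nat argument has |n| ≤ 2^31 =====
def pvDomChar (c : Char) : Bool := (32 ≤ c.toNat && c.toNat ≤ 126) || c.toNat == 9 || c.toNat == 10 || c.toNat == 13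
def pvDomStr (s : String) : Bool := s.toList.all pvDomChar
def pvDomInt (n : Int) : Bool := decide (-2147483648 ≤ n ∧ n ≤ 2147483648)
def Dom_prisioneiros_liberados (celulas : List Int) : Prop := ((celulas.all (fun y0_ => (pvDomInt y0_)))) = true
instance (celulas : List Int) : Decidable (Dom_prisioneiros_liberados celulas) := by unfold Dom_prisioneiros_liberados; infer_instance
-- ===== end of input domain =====

-- B replaces A's quadratic repeated whole-list flipping by one pass comparing each cell
-- to a parity-derived target (objective: faster, asymptotic).

-- ===== PORT A =====
-- the for-loop over range(1, len(celulas)) with its break; state: the (re-flipped) list and the counter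
def pvLoopA (celulas : List Int) (i n : Nat) (count : Int) : Int :=
  if _h : i < n then
    match PySem.List.pyGet? celulas (i : Int) with
    | none => count        -- unreachable: i < n = length stays invariant
    | some c =>
      if c = 0 then count
      else pvLoopA (celulas.map (fun celula => 1 - celula)) (i + 1) n (count + 1)
  else count
termination_by n - i

def prisioneiros_liberados (celulas : List Int) : Int :=
  match PySem.List.pyGet? celulas (0 : Int) with
  | none => 0              -- IndexError: excluded by Pre_
  | some c0 =>
    if c0 = 0 then 0
    else pvLoopA celulas 1 celulas.length 1

-- ===== PORT B =====
-- the enumerate pass: index i carried along, return i at the first cell equal to its target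
def pvLoopB (xs : List Int) (i : Nat) : Int :=
  match xs with
  | [] => (i : Int)
  | c :: rest =>
    let alvo : Int := if 0 < i ∧ i % 2 = 0 then 1 else 0
    if c = alvo then (i : Int) else pvLoopB rest (i + 1)

def prisioneiros_liberados_alt (celulas : List Int) : Int := pvLoopB celulas 0

-- ===== PRECONDITION & SPEC =====
-- Pre_ excludes only the empty list, on which A's first-element access raises IndexError.
def Pre_prisioneiros_liberados (celulas : List Int) : Prop := celulas ≠ []
instance (celulas : List Int) : Decidable (Pre_prisioneiros_liberados celulas) := by unfold Pre_prisioneiros_liberados; infer_instance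
def pvWitness_prisioneiros_liberados : List Int := [1, 1, 0]

def Spec_prisioneiros_liberados (celulas : List Int) (out : Int) : Prop := out = prisioneiros_liberados_alt celulas
instance (celulas : List Int) (out : Int) : Decidable (Spec_prisioneiros_liberados celulas out) := by unfold Spec_prisioneiros_liberados; infer_instance

-- ===== CLAIM (what is proved, stated in full; the proofs are below) =====
def Claim_equal_prisioneiros_liberados : Prop := ∀ (celulas : List Int), Dom_prisioneiros_liberados celulas → Pre_prisioneiros_liberados celulas → Spec_prisioneiros_liberados celulas (prisioneiros_liberados celulas)

-- ===== LEMMAS AND PROOFS =====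

-- abbreviation for "the list after k flips"
def pvFlip (L : List Int) : List Int := L.map (fun celula => 1 - celula)

theorem pvFlip_length (L : List Int) : (pvFlip L).length = L.length := by
  simp [pvFlip]

theorem pvFlipIter_getElem? (k : Nat) (L : List Int) (j : Nat) (hj : j < L.length) :
    ((pvFlip)^[k] L)[j]? = some (if k % 2 = 0 then L[j] else 1 - L[j]) := by
  induction k generalizing L with
  | zero => simp [List.getElem?_eq_getElem hj]
  | succ k ih =>
    rw [Function.iterate_succ_apply,
        ih (pvFlip L) (by simpa [pvFlip_length] using hj)]
    have hget : (pvFlip L)[j]'(by simpa [pvFlip_length] using hj) = 1 - L[j] := by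
      simp [pvFlip]
    rw [hget]
    rcases Nat.even_or_odd k with he | ho
    · have h0 : k % 2 = 0 := Nat.even_iff.mp he
      have h1 : (k + 1) % 2 = 1 := by omega
      simp [h0, h1]
    · have h0 : k % 2 = 1 := Nat.odd_iff.mp ho
      have h1 : (k + 1) % 2 = 0 := by omega
      simp [h0, h1]

-- main invariant: at the head of iteration i = k+1 the A-loop (on the k-times-flipped list,
-- counter i) equals the B-loop on the rest of the ORIGINAL list at index i.
theorem pvLoop_eq (L : List Int) (k : Nat) :
    pvLoopA ((pvFlip)^[k] L) (k + 1) L.length ((k : Int) + 1)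
      = pvLoopB (L.drop (k + 1)) (k + 1) := by
  generalize hm : L.length - (k + 1) = m
  induction m generalizing k with
  | zero =>
    have hge : L.length ≤ k + 1 := by omega
    rw [pvLoopA, List.drop_eq_nil_of_le hge]
    simp [pvLoopB, Nat.not_lt.mpr hge]
  | succ m ih =>
    have hlt : k + 1 < L.length := by omega
    have hdrop : L.drop (k + 1) = L[k + 1] :: L.drop (k + 2) :=
      List.drop_eq_getElem_cons hlt
    rw [pvLoopA, dif_pos hlt, PySem.List.pyGet?_natCast,
        pvFlipIter_getElem? k L (k + 1) hlt, hdrop, pvLoopB]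
    have halvo : (if 0 < k + 1 ∧ (k + 1) % 2 = 0 then (1 : Int) else 0)
        = (if (k + 1) % 2 = 0 then (1 : Int) else 0) := by
      simp
    simp only [halvo]
    have hrec := ih (k + 1) (by omega)
    rw [Function.iterate_succ_apply'] at hrec
    simp only [pvFlip] at hrec
    rcases Nat.even_or_odd k with he | ho
    · -- k even: cell checked unflipped, target 0
      have h0 : k % 2 = 0 := Nat.even_iff.mp he
      have h1 : (k + 1) % 2 = 1 := by omega
      simp only [h0, h1, eq_false (by decide : ¬ (1 : Nat) = 0), if_true, if_false]
      by_cases hc : L[k + 1] = 0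
      · simp [hc]
      · simp only [eq_false hc, if_false]
        have hcast : ((k + 1 : Nat) : Int) + 1 = (k : Int) + 1 + 1 := by push_cast; ring
        simp only [show k + 1 + 1 = k + 2 from by omega, hcast] at hrec
        exact hrec
    · -- k odd: cell flipped once, target 1
      have h0 : k % 2 = 1 := Nat.odd_iff.mp ho
      have h1 : (k + 1) % 2 = 0 := by omega
      simp only [h0, h1, eq_false (by decide : ¬ (1 : Nat) = 0), if_true, if_false]
      by_cases hc : L[k + 1] = 1
      · have hz : 1 - L[k + 1] = 0 := by omega
        simp only [eq_true hz, eq_true hc, if_true]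
        push_cast; ring
      · have hc0 : ¬ (1 - L[k + 1] = 0) := by omega
        simp only [eq_false hc0, eq_false hc, if_false]
        have hcast : ((k + 1 : Nat) : Int) + 1 = (k : Int) + 1 + 1 := by push_cast; ring
        simp only [show k + 1 + 1 = k + 2 from by omega, hcast] at hrec
        exact hrec

-- ===== VERDICT (by name: the statement is the Claim_ definition above) =====
theorem prisioneiros_liberados_spec : Claim_equal_prisioneiros_liberados := by
  intro celulas _hdom hpre
  unfold Spec_prisioneiros_liberados
  match celulas with
  | [] => exact absurd rfl hpre
  | c0 :: rest =>
    unfold prisioneiros_liberados prisioneiros_liberados_alt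
    rw [PySem.List.pyGet?_zero_cons]
    rw [pvLoopB]
    simp only [Nat.lt_irrefl, false_and, if_false]
    by_cases hc : c0 = 0
    · simp [hc]
    · simp only [hc, if_false]
      have := pvLoop_eq (c0 :: rest) 0
      simpa using this
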